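-- pv_equiv track=rewrite | github.com/Locumtele/widgets | python-forms/enhanced_form_generator.py | generate_checkbox_input
-- ===== SOURCE A (Python) =====
-- from typing import Dict, List, Any, Optional
--
-- def generate_checkbox_input(question: Dict, question_id: str) -> str:
--     """Generate checkbox options"""
--     safe_answers = question.get('safeAnswers', [])
--     flag_answers = question.get('flagAnswers', [])
--     disqualify_answers = question.get('disqualifyAnswers', [])
--
--     # Create options from all answer types
--     all_options = set(safe_answers + flag_answers + disqualify_answers)
--
--     # Sort options to put "none" and "no" options last
--     sorted_options = sorted(all_options, key=lambda x: (
--         x.lower().startswith('none'),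
--         x.lower() == 'none_of_the_above',
--         x.lower() == 'no',
--         x.lower()
--     ))
--
--     html = '<div class="checkbox-group">'
--     for option in sorted_options:
--         # Determine answer type for data attribute
--         answer_type = 'safe'
--         if option in disqualify_answers:
--             answer_type = 'disqualify'
--         elif option in flag_answers:
--             answer_type = 'flag'
--
--         option_label = option.replace('_', ' ').title()
--
--         html += f'''
--             <label class="checkbox-option">
--                 <input type="checkbox"
--                        name="{question_id}"
--                        value="{option}"
--                        data-answer-type="{answer_type}"
--                        autocomplete="off"
--                        onchange="handleAnswerChange(this)">
--                 <span class="checkbox-checkmark"></span>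
--                 {option_label}
--             </label>
--         '''
--
--     html += '</div>'
--     return html
-- ===== SOURCE B (Python) =====
-- def _render(question_id, option, answer_type):
--     option_label = option.replace('_', ' ').title()
--     return f'''
--             <label class="checkbox-option">
--                 <input type="checkbox"
--                        name="{question_id}"
--                        value="{option}"
--                        data-answer-type="{answer_type}"
--                        autocomplete="off"
--                        onchange="handleAnswerChange(this)">
--                 <span class="checkbox-checkmark"></span>
--                 {option_label}
--             </label>
--         '''
--
--
-- def _bucket(option):
--     lo = option.lower()
--     if lo == 'none_of_the_above':
--         return 3
--     if lo.startswith('none'):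
--         return 2
--     if lo == 'no':
--         return 1
--     return 0
--
--
-- def generate_checkbox_input(question, question_id):
--     """Generate checkbox options: tag each option while deduping in precedence
--     order, then bucket-sort (four buckets by the 'none'/'no' rules, lexicographic
--     lowercase within a bucket) and emit the tagged pairs."""
--     # One dedup pass in precedence order: an option keeps the type of the first
--     # list that contains it, scanning disqualify, then flag, then safe.
--     tagged = []
--     seen = []
--     for options, answer_type in (
--         (question.get('disqualifyAnswers', []), 'disqualify'),
--         (question.get('flagAnswers', []), 'flag'),
--         (question.get('safeAnswers', []), 'safe'),
--     ):
--         for option in options: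
--             if option not in seen:
--                 seen.append(option)
--                 tagged.append((option, answer_type))
--
--     # Bucket sort replacing A's 4-tuple key: buckets ordered
--     # ordinary < 'no' < 'none*' < 'none_of_the_above', lowercase lexicographic inside.
--     ordered = []
--     for b in range(4):
--         ordered.extend(sorted((p for p in tagged if _bucket(p[0]) == b),
--                               key=lambda p: p[0].lower()))
--
--     pieces = ['<div class="checkbox-group">']
--     for option, answer_type in ordered:
--         pieces.append(_render(question_id, option, answer_type))
--     pieces.append('</div>')
--     return ''.join(pieces)
-- ===== Notes on version B (the rewrite author's own statement) =====
-- stated objective: alternative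
-- what changed: B replaces A's set-union + 4-tuple-key sort + per-option if/elif membership scans with one precedence-ordered dedup pass that tags each option as it is first seen (disqualify, then flag, then safe) and a bucket sort: four buckets derived from the 'none'/'no' rules, each sorted by lowercase only, concatenated; the emit loop just unpacks the tagged pairs. Pre_ excludes inputs where two distinct options share a lowercase form: the sort key ties there and A's order comes from Python's hash-seed-dependent set iteration order.
import Mathlib
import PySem

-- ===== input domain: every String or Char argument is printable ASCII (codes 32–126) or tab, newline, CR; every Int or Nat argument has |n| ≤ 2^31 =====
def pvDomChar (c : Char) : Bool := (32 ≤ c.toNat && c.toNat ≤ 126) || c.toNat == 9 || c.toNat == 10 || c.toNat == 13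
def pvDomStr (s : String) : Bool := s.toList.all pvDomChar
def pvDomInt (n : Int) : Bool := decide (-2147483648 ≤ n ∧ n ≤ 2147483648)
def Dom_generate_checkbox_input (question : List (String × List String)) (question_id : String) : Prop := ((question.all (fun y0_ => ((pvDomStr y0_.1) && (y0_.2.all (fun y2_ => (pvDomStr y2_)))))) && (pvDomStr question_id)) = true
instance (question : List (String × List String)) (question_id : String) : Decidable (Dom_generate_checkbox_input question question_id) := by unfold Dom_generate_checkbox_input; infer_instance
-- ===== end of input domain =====

set_option maxRecDepth 8000


-- B replaces A's set-union + 4-tuple-key sort + per-option if/elif membership scans by one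
-- precedence-ordered dedup pass that TAGS each option as it is first seen (disqualify, then flag,
-- then safe) and a BUCKET sort (four buckets from the 'none'/'no' rules, lowercase-lexicographic
-- inside each bucket); objective: alternative decomposition, same output.

-- Shared helpers (identical literal code in both Pythons) ---------------------

-- question.get(key, []) on the assoc-list dict (first-match lookup)
def pvQGet (question : List (String × List String)) (key : String) : List String :=
  (PySem.Dict.mk question).getD key []

-- Python str.title(), hand-ported (PySem has no title): a letter starting an alphabetic run is
-- uppercased, other letters lowercased. Exact on the ASCII domain, where cased chars = letters.
def pvTitleGo (prevAlpha : Bool) : List Char → List Char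
  | [] => []
  | c :: rest =>
      (if PySem.Chars.isalpha c then
        (if prevAlpha then PySem.Chars.lowerChar c else PySem.Chars.upperChar c)
       else c) :: pvTitleGo (PySem.Chars.isalpha c) rest

def pvTitle (s : String) : String := String.ofList (pvTitleGo false s.toList)

-- the per-option f-string chunk (identical literal in both Pythons)
def pvOptionHtml (question_id option answer_type : String) : String :=
  "\n            <label class=\"checkbox-option\">\n                <input type=\"checkbox\"\n                       name=\""
  ++ question_id
  ++ "\"\n                       value=\""
  ++ option
  ++ "\"\n                       data-answer-type=\""
  ++ answer_type
  ++ "\"\n                       autocomplete=\"off\"\n                       onchange=\"handleAnswerChange(this)\">\n                <span class=\"checkbox-checkmark\"></span>\n                "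
  ++ pvTitle (PySem.Str.replace option "_" " ")
  ++ "\n            </label>\n        "

-- ===== PORT A =====
-- A's 4-tuple sort key (b1,b2,b3,lower x): the three leading booleans packed into one Int
-- (4*b1+2*b2+b3), which orders pairs (pvKey1 x, pvKey2 x) exactly as Python orders the tuples
def pvKey1 (x : String) : Int :=
  (if PySem.Str.startswith (PySem.Str.lower x) "none" then 4 else 0)
  + (if PySem.Str.lower x == "none_of_the_above" then 2 else 0)
  + (if PySem.Str.lower x == "no" then 1 else 0)

def pvKey2 (x : String) : String := PySem.Str.lower x

def generate_checkbox_input (question : List (String × List String)) (question_id : String) : String :=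
  let safe_answers := pvQGet question "safeAnswers"
  let flag_answers := pvQGet question "flagAnswers"
  let disqualify_answers := pvQGet question "disqualifyAnswers"
  let all_options : PySem.Set String :=
    PySem.Set.ofList (safe_answers ++ flag_answers ++ disqualify_answers)
  let sorted_options := PySem.List.sorted2 all_options pvKey1 pvKey2
  let html := sorted_options.foldl (fun html option =>
      let answer_type : String :=
        if disqualify_answers.contains option then "disqualify"
        else if flag_answers.contains option then "flag"
        else "safe"
      html ++ pvOptionHtml question_id option answer_type)
    "<div class=\"checkbox-group\">"
  html ++ "</div>"

-- ===== PORT B =====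
-- B's bucket: ordinary < 'no' < 'none*' < 'none_of_the_above'
def pvBucket (option : String) : Int :=
  let lo := PySem.Str.lower option
  if lo == "none_of_the_above" then 3
  else if PySem.Str.startswith lo "none" then 2
  else if lo == "no" then 1
  else 0

-- one pass of B's dedup-and-tag loop ('for option in options: if option not in seen: …')
def pvTagPass (st : List (String × String) × List String) (pass : List String × String) :
    List (String × String) × List String :=
  pass.1.foldl (fun st option =>
      if st.2.contains option then st
      else (st.1 ++ [(option, pass.2)], st.2 ++ [option])) st

def generate_checkbox_input_alt (question : List (String × List String)) (question_id : String) : String :=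
  let tagged_seen :=
    [(pvQGet question "disqualifyAnswers", "disqualify"),
     (pvQGet question "flagAnswers", "flag"),
     (pvQGet question "safeAnswers", "safe")].foldl pvTagPass ([], [])
  let tagged := tagged_seen.1
  let ordered := (PySem.List.pyRange 0 4 1).foldl (fun acc b =>
      acc ++ PySem.List.sorted (tagged.filter (fun p => pvBucket p.1 == b))
              (fun p => PySem.Str.lower p.1)) []
  let pieces := ["<div class=\"checkbox-group\">"]
      ++ ordered.map (fun p => pvOptionHtml question_id p.1 p.2)
      ++ ["</div>"]
  PySem.Str.join "" pieces

-- ===== PRECONDITION & SPEC =====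
-- Pre_ excludes inputs where two DISTINCT options of the union share the same lowercase form: there
-- the sort key ties and A's order of the tied options comes from Python's hash-seed-dependent set
-- iteration order (no single value to match); B keeps first-insertion order there.
def Pre_generate_checkbox_input (question : List (String × List String)) (question_id : String) : Prop :=
  (PySem.Set.ofList (pvQGet question "safeAnswers" ++ pvQGet question "flagAnswers"
      ++ pvQGet question "disqualifyAnswers")).Pairwise
    (fun a b => PySem.Str.lower a ≠ PySem.Str.lower b)

instance (question : List (String × List String)) (question_id : String) : Decidable (Pre_generate_checkbox_input question question_id) := by unfold Pre_generate_checkbox_input; infer_instance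

def pvWitness_generate_checkbox_input : (List (String × List String)) × String :=
  ([("safeAnswers", ["yes"]), ("flagAnswers", ["chest_pain"]), ("disqualifyAnswers", ["none_of_the_above"])], "q1")

def Spec_generate_checkbox_input (question : List (String × List String)) (question_id : String) (out : String) : Prop := out = generate_checkbox_input_alt question question_id
instance (question : List (String × List String)) (question_id : String) (out : String) : Decidable (Spec_generate_checkbox_input question question_id out) := by unfold Spec_generate_checkbox_input; infer_instance

-- ===== CLAIM (what is proved, stated in full; the proofs are below) =====
def Claim_equal_generate_checkbox_input : Prop := ∀ (question : List (String × List String)) (question_id : String), Dom_generate_checkbox_input question question_id → Pre_generate_checkbox_input question question_id → Spec_generate_checkbox_input question question_id (generate_checkbox_input question question_id)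

-- ===== LEMMAS AND PROOFS =====

-- A's if/elif answer-type chain, as a function (proof-local shorthand)
def pvClassify (dq fl : List String) (o : String) : String :=
  if dq.contains o then "disqualify" else if fl.contains o then "flag" else "safe"

-- A's tuple key as one lexicographic key
def pvKeyL (x : String) : Lex (Int × String) := toLex (pvKey1 x, pvKey2 x)

-- pvKey1 factors through B's bucket
def pvBVal (b : Int) : Int := if b = 3 then 6 else if b = 2 then 4 else if b = 1 then 1 else 0

theorem pv_key1_eq (x : String) : pvKey1 x = pvBVal (pvBucket x) := by
  have hlow : PySem.Chars.lower x.toList = (PySem.Str.lower x).toList := (PySem.Str.toList_lower x).symm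
  by_cases e3 : PySem.Str.lower x = "none_of_the_above"
  · have e2 : PySem.Chars.startswith (PySem.Chars.lower x.toList) ['n','o','n','e'] = true := by
      rw [hlow, e3]; decide
    have e1 : PySem.Str.lower x ≠ "no" := by rw [e3]; decide
    simp [pvKey1, pvBucket, pvBVal, e3, e2, e1]
    decide
  · by_cases e2 : PySem.Chars.startswith (PySem.Chars.lower x.toList) ['n','o','n','e'] = true
    · have e1 : PySem.Str.lower x ≠ "no" := by
        intro h; rw [hlow, h] at e2; exact absurd e2 (by decide)
      simp [pvKey1, pvBucket, pvBVal, e3, e2, e1]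
    · by_cases e1 : PySem.Str.lower x = "no"
      · simp [pvKey1, pvBucket, pvBVal, e3, e2, e1]
        decide
      · simp [pvKey1, pvBucket, pvBVal, e3, e2, e1]

theorem pv_bucket_range (x : String) : pvBucket x = 0 ∨ pvBucket x = 1 ∨ pvBucket x = 2 ∨ pvBucket x = 3 := by
  simp only [pvBucket]
  split_ifs <;> simp

theorem pv_key1_lt_of_bucket_lt {a b : String} (h : pvBucket a < pvBucket b) : pvKey1 a < pvKey1 b := by
  rw [pv_key1_eq, pv_key1_eq]
  rcases pv_bucket_range a with ha | ha | ha | ha <;> rcases pv_bucket_range b with hb | hb | hb | hb <;>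
    rw [ha, hb] at h ⊢ <;> simp_all [pvBVal] <;> omega

theorem pv_key1_eq_of_bucket_eq {a b : String} (h : pvBucket a = pvBucket b) : pvKey1 a = pvKey1 b := by
  rw [pv_key1_eq, pv_key1_eq, h]

theorem pv_keyL_lt_of_bucket_lt {a c : String} (h : pvBucket a < pvBucket c) : pvKeyL a < pvKeyL c :=
  Prod.Lex.lt_iff.mpr (Or.inl (pv_key1_lt_of_bucket_lt h))

theorem pv_keyL_lt_of_bucket_eq {a c : String} (hb : pvBucket a = pvBucket c)
    (hl : pvKey2 a < pvKey2 c) : pvKeyL a < pvKeyL c :=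
  Prod.Lex.lt_iff.mpr (Or.inr ⟨pv_key1_eq_of_bucket_eq hb, hl⟩)

-- sorted2 with keys k1, k2 IS sorted with the lexicographic key (the comparison booleans coincide)
theorem pv_sorted2_eq_sorted_lex {α : Type} (xs : List α) (k1 : α → Int) (k2 : α → String) :
    PySem.List.sorted2 xs k1 k2 = PySem.List.sorted xs (fun x => toLex (k1 x, k2 x)) := by
  unfold PySem.List.sorted2 PySem.List.sorted
  simp only [if_neg (by decide : ¬ (false = true))]
  have : (fun (a b : α) => decide (k1 a < k1 b) || (!decide (k1 b < k1 a) && decide (k2 a < k2 b)))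
      = (fun a b => decide ((fun x => toLex (k1 x, k2 x)) a < (fun x => toLex (k1 x, k2 x)) b)) := by
    funext a b
    rcases lt_trichotomy (k1 a) (k1 b) with h | h | h
    · simp [Prod.Lex.lt_iff, h, not_lt_of_gt h]
    · simp [Prod.Lex.lt_iff, h, lt_irrefl]
    · simp [Prod.Lex.lt_iff, h, not_lt_of_gt h, ne_of_gt h, le_of_lt h]
  rw [this]

-- the new elements an update pass appends, in order
theorem pv_drop_update (sn l : List String) :
    (PySem.Set.update sn l).drop sn.length
      = (PySem.Set.ofList l).filter (fun y => !PySem.Set.contains sn y) := by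
  rw [PySem.Set.update_eq_append_filter, List.drop_left]

-- one dedup-and-tag pass appends exactly the new elements, tagged with this pass's type
theorem pv_pass_eq (l : List String) (t : String) (tg : List (String × String)) (sn : List String) :
    pvTagPass (tg, sn) (l, t)
      = (tg ++ ((PySem.Set.update sn l).drop sn.length).map (fun o => (o, t)),
         PySem.Set.update sn l) := by
  induction l generalizing tg sn with
  | nil => simp [pvTagPass, PySem.Set.update_nil]
  | cons o l ih =>
      by_cases h : o ∈ sn
      · have hc : sn.contains o = true := (PySem.Set.contains_iff sn o).mpr h
        have hupd : PySem.Set.update sn (o :: l) = PySem.Set.update sn l := by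
          rw [PySem.Set.update_cons, PySem.Set.add_of_mem h]
        have := ih tg sn
        simp only [pvTagPass, List.foldl_cons, hc, if_true] at this ⊢
        rw [hupd]; exact this
      · have hc : sn.contains o = false := by
          simpa using (fun hh => h ((PySem.Set.contains_iff sn o).mp hh))
        have hupd : PySem.Set.update sn (o :: l) = PySem.Set.update (sn ++ [o]) l := by
          rw [PySem.Set.update_cons, PySem.Set.add_of_not_mem h]
        have := ih (tg ++ [(o, t)]) (sn ++ [o])
        simp only [pvTagPass, List.foldl_cons, hc, if_false, Bool.false_eq_true] at this ⊢
        rw [hupd, this, PySem.Set.update_eq_append_filter (sn ++ [o]) l, List.drop_left,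
          show (sn ++ [o]) ++ List.filter (fun y => !PySem.Set.contains (sn ++ [o]) y) (PySem.Set.ofList l)
              = sn ++ (o :: List.filter (fun y => !PySem.Set.contains (sn ++ [o]) y) (PySem.Set.ofList l)) by simp,
          List.drop_left]
        simp

-- B's three tag passes build exactly A's option set, each option paired with A's answer type
theorem pv_tagged_eq (dq fl sf : List String) :
    ([(dq, "disqualify"), (fl, "flag"), (sf, "safe")].foldl pvTagPass ([], [])).1
      = (PySem.Set.ofList (dq ++ fl ++ sf)).map (fun o => (o, pvClassify dq fl o)) := by
  have h1 := pv_pass_eq dq "disqualify" [] []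
  have h2 := pv_pass_eq fl "flag"
  have h3 := pv_pass_eq sf "safe"
  simp only [List.foldl_cons, List.foldl_nil]
  rw [h1]
  simp only [List.nil_append, List.length_nil, List.drop_zero, PySem.Set.update_nil_left]
  rw [h2, h3, pv_drop_update, pv_drop_update]
  have hS : PySem.Set.ofList (dq ++ fl ++ sf)
      = (PySem.Set.ofList dq).update fl
        ++ List.filter (fun y => !PySem.Set.contains ((PySem.Set.ofList dq).update fl) y) (PySem.Set.ofList sf) := by
    rw [← PySem.Set.update_eq_append_filter, ← PySem.Set.ofList_append, ← PySem.Set.ofList_append,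
      List.append_assoc]
  rw [hS, PySem.Set.update_eq_append_filter (PySem.Set.ofList dq) fl]
  simp only [List.map_append, List.append_assoc]
  congr 1
  · apply List.map_congr_left
    intro o ho
    have : o ∈ dq := (PySem.Set.mem_ofList dq o).mp ho
    simp [pvClassify, this]
  congr 1
  · apply List.map_congr_left
    intro o ho
    simp at ho
    simp [pvClassify, ho.1, ho.2]
  · apply List.map_congr_left
    intro o ho
    simp at ho
    have hdq : o ∉ dq := ho.2.1
    have hfl : o ∉ fl := Or.resolve_right ho.2.2 hdq
    simp [pvClassify, hdq, hfl]

-- sorting a mapped list = mapping the sorted list (same comparisons, in order)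
theorem pv_insertBy_map {α β : Type} (f : α → β) (bef : β → β → Bool) (x : α) (acc : List α) :
    PySem.List.insertBy bef (f x) (acc.map f)
      = (PySem.List.insertBy (fun a b => bef (f a) (f b)) x acc).map f := by
  induction acc with
  | nil => simp [PySem.List.insertBy]
  | cons y ys ih =>
      simp only [List.map_cons, PySem.List.insertBy]
      by_cases h : bef (f x) (f y)
      · simp [h]
      · simp [h, ih]

theorem pv_sorted_map {α β κ : Type} [LT κ] [DecidableLT κ] (f : α → β) (l : List α) (key : β → κ) :
    PySem.List.sorted (l.map f) key = (PySem.List.sorted l (fun a => key (f a))).map f := by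
  unfold PySem.List.sorted
  simp only [if_neg (by decide : ¬ (false = true))]
  suffices h : ∀ acc : List α,
      List.foldl (fun acc x => PySem.List.insertBy (fun a b => decide (key a < key b)) x acc) (acc.map f) (l.map f)
        = (List.foldl (fun acc x => PySem.List.insertBy (fun a b => decide (key (f a) < key (f b))) x acc) acc l).map f by
    simpa using h []
  induction l with
  | nil => intro acc; simp
  | cons x xs ih =>
      intro acc
      simp only [List.map_cons, List.foldl_cons]
      rw [pv_insertBy_map f (fun a b => decide (key a < key b)) x acc]
      exact ih _

-- string-joining shapes
theorem pv_join_nil (parts : List (List Char)) : PySem.Chars.join [] parts = parts.flatten := by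
  induction parts with
  | nil => rfl
  | cons a t ih => cases t <;> simp_all [PySem.Chars.join, List.intercalate]

theorem pv_foldl_append_eq_join {α : Type} (f : α → String) (l : List α) (init : String) :
    l.foldl (fun h o => h ++ f o) init = init ++ PySem.Str.join "" (l.map f) := by
  apply String.ext
  induction l generalizing init with
  | nil => simp [PySem.Str.toList_join]
  | cons a t ih =>
      simp only [List.foldl_cons, List.map_cons, ih, String.toList_append, PySem.Str.toList_join]
      rw [show ("" : String).toList = [] from rfl, pv_join_nil, pv_join_nil]
      simp [List.append_assoc]

theorem pv_join_wrap (hd ft : String) (chunks : List String) :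
    PySem.Str.join "" ([hd] ++ chunks ++ [ft]) = (hd ++ PySem.Str.join "" chunks) ++ ft := by
  apply String.ext
  simp only [PySem.Str.toList_join, String.toList_append]
  rw [show ("" : String).toList = [] from rfl, pv_join_nil, pv_join_nil]
  simp

-- members of a sorted bucket: in the base set, with that bucket value
theorem pv_sorted_filter_mem {T : List String} {b : Int} {a : String}
    (h : a ∈ PySem.List.sorted (T.filter (fun o => pvBucket o == b)) pvKey2) :
    a ∈ T ∧ pvBucket a = b := by
  rw [PySem.List.mem_sorted] at h
  have hf := List.mem_filter.mp h
  exact ⟨hf.1, by simpa using hf.2⟩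

-- inside one bucket the lexicographic key is strictly increasing (lowercase forms are distinct)
theorem pv_lb_pairwise (T : List String) (hT : T.Nodup)
    (hdist : ∀ a ∈ T, ∀ c ∈ T, a ≠ c → pvKey2 a ≠ pvKey2 c) (b : Int) :
    (PySem.List.sorted (T.filter (fun o => pvBucket o == b)) pvKey2).Pairwise
      (fun a c => pvKeyL a < pvKeyL c) := by
  have hle := PySem.List.sorted_pairwise (T.filter (fun o => pvBucket o == b)) pvKey2
  have hnd : (PySem.List.sorted (T.filter (fun o => pvBucket o == b)) pvKey2).Nodup :=
    (PySem.List.sorted_perm _ _ _).nodup_iff.mpr (hT.filter _)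
  refine ((hle.and hnd).imp_of_mem ?_)
  intro a c ha hc h
  have hba := pv_sorted_filter_mem ha
  have hbc := pv_sorted_filter_mem hc
  exact pv_keyL_lt_of_bucket_eq (hba.2.trans hbc.2.symm)
    (lt_of_le_of_ne h.1 (hdist a hba.1 c hbc.1 h.2))

-- the whole bucket concatenation is strictly increasing in the lexicographic key
theorem pv_L_pairwise (T : List String) (hT : T.Nodup)
    (hdist : ∀ a ∈ T, ∀ c ∈ T, a ≠ c → pvKey2 a ≠ pvKey2 c) :
    (PySem.List.sorted (T.filter (fun o => pvBucket o == (0:Int))) pvKey2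
      ++ PySem.List.sorted (T.filter (fun o => pvBucket o == (1:Int))) pvKey2
      ++ PySem.List.sorted (T.filter (fun o => pvBucket o == (2:Int))) pvKey2
      ++ PySem.List.sorted (T.filter (fun o => pvBucket o == (3:Int))) pvKey2).Pairwise
      (fun a c => pvKeyL a < pvKeyL c) := by
  have cross : ∀ (b b' : Int), b < b' → ∀ a ∈ PySem.List.sorted (T.filter (fun o => pvBucket o == b)) pvKey2,
      ∀ c ∈ PySem.List.sorted (T.filter (fun o => pvBucket o == b')) pvKey2, pvKeyL a < pvKeyL c := by
    intro b b' hbb a ha c hc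
    have hba := pv_sorted_filter_mem ha
    have hbc := pv_sorted_filter_mem hc
    exact pv_keyL_lt_of_bucket_lt (by rw [hba.2, hbc.2]; exact hbb)
  rw [List.pairwise_append, List.pairwise_append, List.pairwise_append]
  refine ⟨⟨⟨pv_lb_pairwise T hT hdist 0, pv_lb_pairwise T hT hdist 1, cross 0 1 (by norm_num)⟩,
    pv_lb_pairwise T hT hdist 2, ?_⟩, pv_lb_pairwise T hT hdist 3, ?_⟩
  · intro a ha c hc
    rcases List.mem_append.mp ha with h | h
    · exact cross 0 2 (by norm_num) a h c hc
    · exact cross 1 2 (by norm_num) a h c hc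
  · intro a ha c hc
    rcases List.mem_append.mp ha with h | h
    · rcases List.mem_append.mp h with h' | h'
      · exact cross 0 3 (by norm_num) a h' c hc
      · exact cross 1 3 (by norm_num) a h' c hc
    · exact cross 2 3 (by norm_num) a h c hc

-- B's bucket concatenation IS A's sorted set: the unique strictly key-increasing arrangement
theorem pv_L_eq_sorted (dq fl sf : List String)
    (hpre : (PySem.Set.ofList (sf ++ fl ++ dq)).Pairwise
      (fun a b => PySem.Str.lower a ≠ PySem.Str.lower b)) :
    PySem.List.sorted (PySem.Set.ofList (sf ++ fl ++ dq)) pvKeyL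
      = PySem.List.sorted ((PySem.Set.ofList (dq ++ fl ++ sf)).filter (fun o => pvBucket o == (0:Int))) pvKey2
        ++ PySem.List.sorted ((PySem.Set.ofList (dq ++ fl ++ sf)).filter (fun o => pvBucket o == (1:Int))) pvKey2
        ++ PySem.List.sorted ((PySem.Set.ofList (dq ++ fl ++ sf)).filter (fun o => pvBucket o == (2:Int))) pvKey2
        ++ PySem.List.sorted ((PySem.Set.ofList (dq ++ fl ++ sf)).filter (fun o => pvBucket o == (3:Int))) pvKey2 := by
  set S := PySem.Set.ofList (sf ++ fl ++ dq) with hSdef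
  set T := PySem.Set.ofList (dq ++ fl ++ sf) with hTdef
  have hTnd : T.Nodup := PySem.Set.nodup_ofList _
  have hSnd : S.Nodup := PySem.Set.nodup_ofList _
  have hmemTS : ∀ a : String, a ∈ T ↔ a ∈ S := by
    intro a
    rw [hSdef, hTdef, PySem.Set.mem_ofList, PySem.Set.mem_ofList]
    simp only [List.mem_append]
    tauto
  have hdist : ∀ a ∈ T, ∀ c ∈ T, a ≠ c → pvKey2 a ≠ pvKey2 c := by
    intro a ha c hc hne
    have := List.Pairwise.forall (l := S) (R := fun a b => PySem.Str.lower a ≠ PySem.Str.lower b)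
      (fun x y h => (Ne.symm h)) hpre ((hmemTS a).mp ha) ((hmemTS c).mp hc) hne
    simpa [pvKey2] using this
  have hpw := pv_L_pairwise T hTnd hdist
  have hLnd : (PySem.List.sorted (T.filter (fun o => pvBucket o == (0:Int))) pvKey2
      ++ PySem.List.sorted (T.filter (fun o => pvBucket o == (1:Int))) pvKey2
      ++ PySem.List.sorted (T.filter (fun o => pvBucket o == (2:Int))) pvKey2
      ++ PySem.List.sorted (T.filter (fun o => pvBucket o == (3:Int))) pvKey2).Nodup :=
    hpw.imp (fun h => ne_of_apply_ne pvKeyL (ne_of_lt h))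
  have hperm : (PySem.List.sorted (T.filter (fun o => pvBucket o == (0:Int))) pvKey2
      ++ PySem.List.sorted (T.filter (fun o => pvBucket o == (1:Int))) pvKey2
      ++ PySem.List.sorted (T.filter (fun o => pvBucket o == (2:Int))) pvKey2
      ++ PySem.List.sorted (T.filter (fun o => pvBucket o == (3:Int))) pvKey2).Perm S := by
    rw [List.perm_ext_iff_of_nodup hLnd hSnd]
    intro a
    rw [← hmemTS a]
    simp only [List.mem_append, PySem.List.mem_sorted, List.mem_filter, beq_iff_eq]
    constructor
    · rintro (((⟨h, _⟩ | ⟨h, _⟩) | ⟨h, _⟩) | ⟨h, _⟩) <;> exact h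
    · intro h
      rcases pv_bucket_range a with hb | hb | hb | hb
      · exact Or.inl (Or.inl (Or.inl ⟨h, hb⟩))
      · exact Or.inl (Or.inl (Or.inr ⟨h, hb⟩))
      · exact Or.inl (Or.inr ⟨h, hb⟩)
      · exact Or.inr ⟨h, hb⟩
  exact PySem.List.sorted_eq_of_perm_of_pairwise_lt S _ pvKeyL hperm hpw

-- ===== VERDICT (by name: the statement is the Claim_ definition above) =====
theorem generate_checkbox_input_spec : Claim_equal_generate_checkbox_input := by
  intro question question_id _ hpre
  show generate_checkbox_input question question_id = generate_checkbox_input_alt question question_id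
  simp only [generate_checkbox_input, generate_checkbox_input_alt]
  rw [pv_tagged_eq]
  rw [show PySem.List.pyRange 0 4 1 = [(0:Int),1,2,3] from rfl]
  simp only [List.foldl_cons, List.foldl_nil, List.nil_append]
  rw [List.filter_map, List.filter_map, List.filter_map, List.filter_map]
  simp only [Function.comp_def, pv_sorted_map]
  rw [show (fun a : String => PySem.Str.lower a) = pvKey2 from rfl]
  simp only [← List.map_append, List.map_map]
  rw [pv_join_wrap, pv_foldl_append_eq_join]
  rw [pv_sorted2_eq_sorted_lex]
  rw [show (fun x : String => toLex (pvKey1 x, pvKey2 x)) = pvKeyL from rfl]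
  rw [pv_L_eq_sorted _ _ _ hpre]
  rfl
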